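-- pv_equiv track=rewrite | github.com/famgz/ig-dl | src/ig_dl/main.py | media_id_to_code
-- ===== SOURCE A (Python) =====
-- _ASCII = 'ABCDEFGHIJKLMNOPQRSTUVWXYZabcdefghijklmnopqrstuvwxyz0123456789-_'
--
-- def media_id_to_code(media_id):
--     media_id = int(media_id)
--     short_code = ''
--     while media_id > 0:
--         remainder = media_id % 64
--         media_id = (media_id-remainder)//64
--         short_code = _ASCII[remainder] + short_code
--     return short_code
-- ===== SOURCE B (Python) =====
-- _ASCII = 'ABCDEFGHIJKLMNOPQRSTUVWXYZabcdefghijklmnopqrstuvwxyz0123456789-_'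
--
-- def media_id_to_code(media_id):
--     media_id = int(media_id)
--     if media_id <= 0:
--         return ''
--     return media_id_to_code(media_id // 64) + _ASCII[media_id % 64]
-- ===== Notes on version B (the rewrite author's own statement) =====
-- stated objective: simpler
-- what changed: Replaces the explicit while-loop with accumulator and string prepending by a direct recursion on the quotient that appends the lowest base-64 digit, removing the mutable loop state.
import Mathlib
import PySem

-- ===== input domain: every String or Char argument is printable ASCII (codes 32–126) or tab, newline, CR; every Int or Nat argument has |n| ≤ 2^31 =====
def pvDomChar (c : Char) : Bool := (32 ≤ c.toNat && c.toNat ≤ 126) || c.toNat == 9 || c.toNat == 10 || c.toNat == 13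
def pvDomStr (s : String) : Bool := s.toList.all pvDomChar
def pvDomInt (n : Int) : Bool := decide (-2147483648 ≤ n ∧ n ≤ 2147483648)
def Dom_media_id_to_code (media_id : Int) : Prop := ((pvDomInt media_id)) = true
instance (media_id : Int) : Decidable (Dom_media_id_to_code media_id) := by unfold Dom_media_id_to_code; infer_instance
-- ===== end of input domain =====

-- B replaces A's while loop (prepend, mutable accumulator) by direct recursion on the
-- quotient, appending the lowest digit; same result, simpler shape ('simpler', not faster).

-- the module-level _ASCII table, as its list of characters
def pvAscii : List Char :=
  "ABCDEFGHIJKLMNOPQRSTUVWXYZabcdefghijklmnopqrstuvwxyz0123456789-_".toList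

-- ===== PORT A =====
-- A's while loop: state = (media_id, short_code); short_code kept as List Char
def mediaLoopA (m : Int) (acc : List Char) : List Char :=
  if h : m > 0 then
    let r := PySem.Int.mod m 64
    mediaLoopA (PySem.Int.floordiv (m - r) 64) (PySem.List.pyGetD pvAscii r ' ' :: acc)
  else acc
termination_by m.toNat
decreasing_by
  have h64 : (0:Int) < 64 := by omega
  have hm : PySem.Int.mod m 64 = m % 64 := PySem.Int.mod_eq_emod_of_pos (by omega)
  have hf : PySem.Int.floordiv (m - PySem.Int.mod m 64) 64 = (m - m % 64) / 64 := by
    rw [hm]; exact PySem.Int.floordiv_eq_ediv_of_pos (by omega)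
  rw [hf]
  have h1 : (m - m % 64) / 64 = m / 64 - (m % 64) / 64 := by
    omega
  have h2 : (m % 64) / 64 = 0 := by omega
  have h3 : m / 64 < m := by omega
  omega

def media_id_to_code (media_id : Int) : String :=
  String.ofList (mediaLoopA media_id [])

-- ===== PORT B =====
-- B's recursion: '' for media_id ≤ 0, else code(media_id // 64) + _ASCII[media_id % 64]
def mediaRecB (m : Int) : List Char :=
  if h : m ≤ 0 then []
  else
    mediaRecB (PySem.Int.floordiv m 64) ++
      [PySem.List.pyGetD pvAscii (PySem.Int.mod m 64) ' ']
termination_by m.toNat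
decreasing_by
  have hf : PySem.Int.floordiv m 64 = m / 64 := PySem.Int.floordiv_eq_ediv_of_pos (by omega)
  rw [hf]
  omega

def media_id_to_code_alt (media_id : Int) : String :=
  String.ofList (mediaRecB media_id)

-- ===== PRECONDITION & SPEC =====
def Spec_media_id_to_code (media_id : Int) (out : String) : Prop := out = media_id_to_code_alt media_id
instance (media_id : Int) (out : String) : Decidable (Spec_media_id_to_code media_id out) := by unfold Spec_media_id_to_code; infer_instance

-- ===== CLAIM (what is proved, stated in full; the proofs are below) =====
def Claim_equal_media_id_to_code : Prop := ∀ (media_id : Int), Dom_media_id_to_code media_id → Spec_media_id_to_code media_id (media_id_to_code media_id)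

-- ===== LEMMAS AND PROOFS =====

-- A's quotient (m - m%64)//64 equals B's m//64
theorem pv_quot_eq (m : Int) :
    PySem.Int.floordiv (m - PySem.Int.mod m 64) 64 = PySem.Int.floordiv m 64 := by
  have hm : PySem.Int.mod m 64 = m % 64 := PySem.Int.mod_eq_emod_of_pos (by omega)
  have h1 : PySem.Int.floordiv (m - PySem.Int.mod m 64) 64 = (m - m % 64) / 64 := by
    rw [hm]; exact PySem.Int.floordiv_eq_ediv_of_pos (by omega)
  have h2 : PySem.Int.floordiv m 64 = m / 64 := PySem.Int.floordiv_eq_ediv_of_pos (by omega)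
  rw [h1, h2]
  omega

-- loop invariant: A's loop from (m, acc) produces B's digits of m followed by acc
theorem pv_loop_eq_rec (m : Int) (acc : List Char) :
    mediaLoopA m acc = mediaRecB m ++ acc := by
  by_cases h : m > 0
  · have hlt : (PySem.Int.floordiv m 64).toNat < m.toNat := by
      have hf : PySem.Int.floordiv m 64 = m / 64 := PySem.Int.floordiv_eq_ediv_of_pos (by omega)
      rw [hf]; omega
    rw [mediaLoopA, mediaRecB]
    simp only [h, if_pos, dif_pos, dif_neg (by omega : ¬ m ≤ 0)]
    rw [pv_quot_eq]
    rw [pv_loop_eq_rec (PySem.Int.floordiv m 64)]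
    simp
  · have hle : m ≤ 0 := by omega
    rw [mediaLoopA, mediaRecB]
    simp [h, hle]
termination_by m.toNat

-- ===== VERDICT (by name: the statement is the Claim_ definition above) =====
theorem media_id_to_code_spec : Claim_equal_media_id_to_code := by
  intro m _
  show media_id_to_code m = media_id_to_code_alt m
  unfold media_id_to_code media_id_to_code_alt
  rw [pv_loop_eq_rec]
  simp
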